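-- pv_equiv track=rewrite | github.com/AlexisMolina12/Lexer-Sintaxis | Automatas/dos_puntos_igual.py | automata_dosPuntosIgual
-- ===== SOURCE A (Python) =====
-- ESTADO_FINAL = "ESTADO FINAL"
--
-- ESTADO_NO_FINAL = "NO ACEPTADO"
--
-- ESTADO_TRAMPA = "EN ESTADO TRAMPA"
--
-- def automata_dosPuntosIgual(lexema):
--     estado = 0
--     estados_finales = [2]
--     delta = {0:{':':1},1:{'=':2},2:{}}
--
--     for caracter in lexema:
--         if caracter in delta[estado].keys():
--             estado = delta[estado][caracter]
--         else:
--             estado = -1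
--             break
--     if estado == -1:
--         return ESTADO_TRAMPA
--     elif estado in estados_finales:
--         return ESTADO_FINAL
--     else:
--         return ESTADO_NO_FINAL
-- ===== SOURCE B (Python) =====
-- ESTADO_FINAL = "ESTADO FINAL"
--
-- ESTADO_NO_FINAL = "NO ACEPTADO"
--
-- ESTADO_TRAMPA = "EN ESTADO TRAMPA"
--
-- def automata_dosPuntosIgual(lexema):
--     chars = list(lexema)
--     if chars == [':', '=']:
--         return ESTADO_FINAL
--     if chars in ([], [':']):
--         return ESTADO_NO_FINAL
--     return ESTADO_TRAMPA
-- ===== Notes on version B (the rewrite author's own statement) =====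
-- stated objective: simpler
-- what changed: Replaces the DFA transition-dict state walk with a direct closed-form comparison of the character list against the sole accepted word and its proper prefixes.
import Mathlib
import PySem

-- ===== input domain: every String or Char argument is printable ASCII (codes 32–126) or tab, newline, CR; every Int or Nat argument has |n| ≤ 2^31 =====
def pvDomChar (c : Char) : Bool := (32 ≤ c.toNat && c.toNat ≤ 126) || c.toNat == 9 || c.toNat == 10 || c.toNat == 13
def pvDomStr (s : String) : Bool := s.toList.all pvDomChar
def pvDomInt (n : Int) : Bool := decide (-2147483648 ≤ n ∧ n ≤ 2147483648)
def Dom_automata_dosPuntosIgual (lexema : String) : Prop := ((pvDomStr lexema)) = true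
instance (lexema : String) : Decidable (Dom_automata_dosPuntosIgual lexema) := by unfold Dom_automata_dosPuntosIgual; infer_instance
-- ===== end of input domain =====

-- B replaces A's DFA/transition-dict state walk by a single closed-form comparison
-- of the character list with ':=' and its proper prefixes (objective: simpler).

-- ===== PORT A =====
-- delta[estado].get(caracter): transition table of A's dict `delta = {0:{':':1},1:{'=':2},2:{}}`;
-- `none` is exactly 'caracter not in delta[estado].keys()'.
def pvDelta (estado : Int) (caracter : Char) : Option Int :=
  if estado = 0 then (if caracter = ':' then some 1 else none)
  else if estado = 1 then (if caracter = '=' then some 2 else none)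
  else none

-- the `for caracter in lexema` loop with the `estado = -1; break` branch
def pvLoopA (estado : Int) : List Char → Int
  | [] => estado
  | c :: rest =>
    match pvDelta estado c with
    | some s => pvLoopA s rest
    | none => -1

def automata_dosPuntosIgual (lexema : String) : String :=
  let estado := pvLoopA 0 lexema.toList
  if estado = -1 then "EN ESTADO TRAMPA"
  else if estado = 2 then "ESTADO FINAL"
  else "NO ACEPTADO"

-- ===== PORT B =====
def automata_dosPuntosIgual_alt (lexema : String) : String :=
  let chars := lexema.toList
  if chars = [':', '='] then "ESTADO FINAL"
  else if chars = [] ∨ chars = [':'] then "NO ACEPTADO"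
  else "EN ESTADO TRAMPA"

-- ===== PRECONDITION & SPEC =====
def Spec_automata_dosPuntosIgual (lexema : String) (out : String) : Prop := out = automata_dosPuntosIgual_alt lexema
instance (lexema : String) (out : String) : Decidable (Spec_automata_dosPuntosIgual lexema out) := by unfold Spec_automata_dosPuntosIgual; infer_instance

-- ===== CLAIM (what is proved, stated in full; the proofs are below) =====
def Claim_equal_automata_dosPuntosIgual : Prop := ∀ (lexema : String), Dom_automata_dosPuntosIgual lexema → Spec_automata_dosPuntosIgual lexema (automata_dosPuntosIgual lexema)

-- ===== LEMMAS AND PROOFS =====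

-- once in state 2 (no outgoing transitions), any further character traps
theorem pvLoopA_two (l : List Char) : l ≠ [] → pvLoopA 2 l = -1 := by
  cases l with
  | nil => intro h; exact absurd rfl h
  | cons c rest => intro _; simp [pvLoopA, pvDelta]

theorem pvLoop_eq_alt (l : List Char) :
    (if pvLoopA 0 l = -1 then "EN ESTADO TRAMPA"
     else if pvLoopA 0 l = 2 then "ESTADO FINAL" else "NO ACEPTADO")
    = (if l = [':', '='] then "ESTADO FINAL"
       else if l = [] ∨ l = [':'] then "NO ACEPTADO" else "EN ESTADO TRAMPA") := by
  match l with
  | [] => simp [pvLoopA]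
  | [c] =>
    by_cases h : c = ':' <;> simp [pvLoopA, pvDelta, h]
  | c :: d :: rest =>
    by_cases hc : c = ':'
    · by_cases hd : d = '='
      · subst hc; subst hd
        cases rest with
        | nil => simp [pvLoopA, pvDelta]
        | cons e r =>
          have h2 : pvLoopA 2 (e :: r) = -1 := pvLoopA_two _ (by simp)
          simp [pvLoopA, pvDelta] at h2 ⊢
      · simp [pvLoopA, pvDelta, hc, hd]
    · simp [pvLoopA, pvDelta, hc]

-- ===== VERDICT (by name: the statement is the Claim_ definition above) =====
theorem automata_dosPuntosIgual_spec : Claim_equal_automata_dosPuntosIgual := by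
  intro lexema _
  unfold Spec_automata_dosPuntosIgual automata_dosPuntosIgual automata_dosPuntosIgual_alt
  exact pvLoop_eq_alt lexema.toList
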